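-- pv_equiv track=rewrite | github.com/pmodv/neyman_pearson | knights_of_neyman.py | weaklyDominates
-- ===== SOURCE A (Python) =====
-- def weaklyDominates(a,b):
--     """Returns True if a[i] >= b[i] for all i and a[j] > b[j] for some j.
--     a,b array-like. Must support slicing, e.g. a[1:]"""
--     if a[0] < b[0]:
--         return False
--     elif len(a) == 1:
--         return a[0] > b[0]
--     elif a[0] > b[0]:
--         return veryWeaklyDominates(a[1:],b[1:])
--     else: # a[0] == b[0] and length > 1
--         return weaklyDominates(a[1:],b[1:])
--
-- def veryWeaklyDominates(a,b):
--     """Returns True if a[i] >= b[i] for all i.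
--     a,b : lists of equal length."""
--     if a[0] < b[0]:
--         return False
--     elif len(a) == 1:
--         return True
--     else:
--         return veryWeaklyDominates(a[1:],b[1:])
-- ===== SOURCE B (Python) =====
-- def weaklyDominates(a, b):
--     """Returns True if a[i] >= b[i] for all i and a[j] > b[j] for some j.
--     Single iterative pass over the paired elements, no slicing, no recursion."""
--     strict = False
--     for x, y in zip(a, b):
--         if x < y:
--             return False
--         if x > y:
--             strict = True
--     return strict
-- ===== Notes on version B (the rewrite author's own statement) =====
-- stated objective: faster
-- what changed: Replaced the two mutually recursive slicing functions with a single iterative pass over zip(a,b) carrying a 'strict' flag.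
import Mathlib
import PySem

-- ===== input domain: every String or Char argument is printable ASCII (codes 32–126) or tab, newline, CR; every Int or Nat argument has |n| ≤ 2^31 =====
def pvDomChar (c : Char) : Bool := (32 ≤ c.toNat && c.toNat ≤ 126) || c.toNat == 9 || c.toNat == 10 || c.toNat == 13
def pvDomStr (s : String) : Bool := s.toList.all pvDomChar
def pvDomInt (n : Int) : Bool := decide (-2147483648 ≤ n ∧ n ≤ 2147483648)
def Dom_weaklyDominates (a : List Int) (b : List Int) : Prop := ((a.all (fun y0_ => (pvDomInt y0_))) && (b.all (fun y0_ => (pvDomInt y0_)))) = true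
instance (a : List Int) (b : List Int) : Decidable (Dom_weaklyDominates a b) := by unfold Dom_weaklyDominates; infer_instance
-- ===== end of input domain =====

-- B replaces A's two mutually recursive, list-slicing functions by one linear pass over
-- the zipped pairs with a 'strict' flag; the claim is about the return value on Pre_,
-- exactly the inputs where Python A returns without raising IndexError.

-- ===== PORT A =====
-- helper of A: veryWeaklyDominates(a, b). The [] patterns are where Python's a[0]/b[0]
-- raises IndexError (excluded by Pre_); the returned false there is junk.
def veryWeaklyDominatesA : List Int → List Int → Bool
  | [], _ => false
  | _ :: _, [] => false
  | a0 :: ar, b0 :: br =>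
    if a0 < b0 then false
    else if ar = [] then true
    else veryWeaklyDominatesA ar br

def weaklyDominates : List Int → List Int → Bool
  | [], _ => false
  | _ :: _, [] => false
  | a0 :: ar, b0 :: br =>
    if a0 < b0 then false
    else if ar = [] then decide (a0 > b0)
    else if a0 > b0 then veryWeaklyDominatesA ar br
    else weaklyDominates ar br

-- ===== PORT B =====
-- the for-loop of B over zip(a,b) with accumulator 'strict'
def altLoop : List (Int × Int) → Bool → Bool
  | [], strict => strict
  | (x, y) :: rest, strict =>
    if x < y then false
    else if x > y then altLoop rest true
    else altLoop rest strict

def weaklyDominates_alt (a : List Int) (b : List Int) : Bool :=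
  altLoop (a.zip b) false

-- ===== PRECONDITION & SPEC =====
-- Exactly the inputs on which Python A returns normally: A raises IndexError iff a is
-- empty, or b is shorter than a and no index i inside b has a[i] < b[i].
def Pre_weaklyDominates (a : List Int) (b : List Int) : Prop :=
  a ≠ [] ∧ (a.length ≤ b.length ∨ ∃ i < a.length, i < b.length ∧ a[i]! < b[i]!)
instance (a : List Int) (b : List Int) : Decidable (Pre_weaklyDominates a b) := by
  unfold Pre_weaklyDominates; infer_instance

def pvWitness_weaklyDominates : List Int × List Int := ([2, 1], [1, 1])

def Spec_weaklyDominates (a : List Int) (b : List Int) (out : Bool) : Prop := out = weaklyDominates_alt a b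
instance (a : List Int) (b : List Int) (out : Bool) : Decidable (Spec_weaklyDominates a b out) := by unfold Spec_weaklyDominates; infer_instance

-- ===== CLAIM (what is proved, stated in full; the proofs are below) =====
def Claim_equal_weaklyDominates : Prop := ∀ (a : List Int) (b : List Int), Dom_weaklyDominates a b → Pre_weaklyDominates a b → Spec_weaklyDominates a b (weaklyDominates a b)

-- ===== LEMMAS AND PROOFS =====

-- the length-or-violation side condition, on its own
def wdCond (a b : List Int) : Prop :=
  a.length ≤ b.length ∨ ∃ i < a.length, i < b.length ∧ a[i]! < b[i]!

lemma cond_tail {a0 b0 : Int} {ar br : List Int} (h : wdCond (a0 :: ar) (b0 :: br))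
    (hge : ¬ a0 < b0) : wdCond ar br := by
  rcases h with h | ⟨i, hia, hib, hlt⟩
  · exact Or.inl (by simpa using h)
  · cases i with
    | zero => simp at hlt; exact absurd hlt hge
    | succ j =>
      exact Or.inr ⟨j, by simpa using hia, by simpa using hib,
        by simpa using hlt⟩

lemma cond_b_ne_nil {a0 : Int} {ar : List Int} (h : wdCond (a0 :: ar) []) : False := by
  rcases h with h | ⟨i, _, hib, _⟩
  · simp at h
  · simp at hib

lemma vw_eq (a : List Int) : ∀ b : List Int, a ≠ [] → wdCond a b →
    veryWeaklyDominatesA a b = altLoop (a.zip b) true := by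
  induction a with
  | nil => intro b hne _; exact absurd rfl hne
  | cons a0 ar ih =>
    intro b _ hc
    cases b with
    | nil => exact absurd hc cond_b_ne_nil
    | cons b0 br =>
      simp only [veryWeaklyDominatesA, List.zip_cons_cons, altLoop]
      by_cases h0 : a0 < b0
      · simp [h0]
      · simp only [if_neg h0]
        by_cases hr : ar = []
        · subst hr; by_cases hgt : a0 > b0 <;> simp [hgt, altLoop]
        · have hc' := cond_tail hc h0
          by_cases hgt : a0 > b0 <;>
            simp [hr, hgt, ih br hr hc']

lemma wk_eq (a : List Int) : ∀ b : List Int, a ≠ [] → wdCond a b →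
    weaklyDominates a b = altLoop (a.zip b) false := by
  induction a with
  | nil => intro b hne _; exact absurd rfl hne
  | cons a0 ar ih =>
    intro b _ hc
    cases b with
    | nil => exact absurd hc cond_b_ne_nil
    | cons b0 br =>
      simp only [weaklyDominates, List.zip_cons_cons, altLoop]
      by_cases h0 : a0 < b0
      · simp [h0]
      · simp only [if_neg h0]
        by_cases hr : ar = []
        · subst hr; by_cases hgt : a0 > b0 <;> simp [hgt, altLoop]
        · have hc' := cond_tail hc h0
          by_cases hgt : a0 > b0
          · simp [hr, hgt, vw_eq ar br hr hc']
          · simp [hr, hgt, ih br hr hc']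

-- ===== VERDICT (by name: the statement is the Claim_ definition above) =====
theorem weaklyDominates_spec : Claim_equal_weaklyDominates := by
  intro a b _ hpre
  unfold Spec_weaklyDominates weaklyDominates_alt
  exact wk_eq a b hpre.1 hpre.2
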